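-- pv_equiv track=rewrite | github.com/PlaviAjvar/Logic-Minimization | logic_optimization.py | parse_dnf
-- ===== SOURCE A (Python) =====
-- def parse_dnf(dnf_str):
--     # we first strip all whitespace
--     dnf_str = "".join(dnf_str.split())
--     conj_list = dnf_str.split('v')  # splits expression by disjunction
--     conj_num = len(conj_list)
--
--     dnf = [[] for i in range(conj_num)]
--     for conj_idx in range(conj_num):
--         conj_len = len(conj_list[conj_idx])
--         for i in range(conj_len):
--             if conj_list[conj_idx][i].isalnum():
--                 # pass the ascii value of the character into the dnf list
--                 # if the argument is negated, pass it's negative ascii value into the dnf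
--                 if i < conj_len-1 and conj_list[conj_idx][i+1] == "'":
--                     dnf[conj_idx].append(-ord(conj_list[conj_idx][i]))
--                 else:
--                     dnf[conj_idx].append(ord(conj_list[conj_idx][i]))
--
--     return dnf
-- ===== SOURCE B (Python) =====
-- def parse_dnf(dnf_str):
--     # Staged decomposition: split each conjunct on apostrophes; each segment
--     # contributes the ords of its alnum chars, and every segment followed by an
--     # apostrophe has its final literal negated when its final char is alnum.
--     compact = "".join(c for c in dnf_str if not c.isspace())
--     dnf = []
--     for conj in compact.split('v'):
--         segs = conj.split("'")
--         lits = []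
--         for k, seg in enumerate(segs):
--             vals = [ord(c) for c in seg if c.isalnum()]
--             if k < len(segs) - 1 and seg and seg[-1].isalnum():
--                 vals[-1] = -vals[-1]
--             lits += vals
--         dnf.append(lits)
--     return dnf
-- ===== Notes on version B (the rewrite author's own statement) =====
-- stated objective: alternative
-- what changed: Replaces A's per-index scan with look-ahead at conj[i+1] by a staged decomposition: each conjunct is split on apostrophes, each segment maps to the ords of its alnum chars via a comprehension, and every non-last segment whose final char is alnum gets its final literal negated; whitespace is stripped by a direct character filter instead of the join-of-split idiom. (constant-factor speedup: comprehensions over segments instead of per-index subscripting conj_list[conj_idx][i] in an index loop)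
import Mathlib
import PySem

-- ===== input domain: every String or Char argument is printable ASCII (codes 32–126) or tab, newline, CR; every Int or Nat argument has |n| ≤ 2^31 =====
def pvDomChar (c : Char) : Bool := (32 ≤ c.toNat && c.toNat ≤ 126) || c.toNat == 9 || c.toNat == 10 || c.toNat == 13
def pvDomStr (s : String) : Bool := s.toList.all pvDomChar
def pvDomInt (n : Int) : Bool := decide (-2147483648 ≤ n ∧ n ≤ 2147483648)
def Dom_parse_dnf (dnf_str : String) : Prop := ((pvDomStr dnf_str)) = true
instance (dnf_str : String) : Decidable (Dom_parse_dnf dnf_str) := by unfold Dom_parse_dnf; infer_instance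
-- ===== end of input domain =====

-- B parses each conjunct by a staged decomposition — split the conjunct on
-- apostrophes, map each segment to the ords of its alnum chars, and negate the
-- final literal of every non-last segment whose final char is alnum — instead of
-- A's per-index scan with look-ahead; objective: alternative algorithm, same cost.


-- ===== PORT A =====
-- A's inner loop 'for i in range(conj_len)' reads conj[i] and (guarded, i < conj_len-1)
-- conj[i+1]; that is exactly the structural recursion on the suffix below, where
-- "i < conj_len-1 and conj[i+1] == '\''" becomes "the rest starts with '\''".
def pvConjA : List Char → List Int → List Int
  | [], acc => acc
  | c :: rest, acc =>
    if PySem.Chars.isalnum c then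
      if (match rest with | d :: _ => d == '\'' | [] => false) then
        pvConjA rest (acc ++ [-((c.toNat : Int))])
      else
        pvConjA rest (acc ++ [(c.toNat : Int)])
    else pvConjA rest acc

def parse_dnf (dnf_str : String) : List (List Int) :=
  -- dnf_str = "".join(dnf_str.split())
  let stripped := PySem.Chars.join [] (PySem.Chars.split₀ dnf_str.toList)
  -- conj_list = dnf_str.split('v'); dnf = [[] …]; the outer for-loop fills dnf[conj_idx]
  let conj_list := PySem.Chars.splitOn stripped ['v']
  conj_list.map (fun conj => pvConjA conj [])

-- ===== PORT B =====
-- vals = [ord(c) for c in seg if c.isalnum()]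
def pvSegVals (seg : List Char) : List Int :=
  (seg.filter (fun c => PySem.Chars.isalnum c)).map (fun c => (c.toNat : Int))

-- the 'for k, seg in enumerate(segs)' loop: the [seg] case is the last segment
-- (k = len(segs)-1); 'seg and seg[-1].isalnum()' is the getLast? match
def pvSegsB : List (List Char) → List Int
  | [] => []
  | [seg] => pvSegVals seg
  | seg :: s2 :: rest =>
    let vals := pvSegVals seg
    (if (match seg.getLast? with | some c => PySem.Chars.isalnum c | none => false)
     then vals.dropLast ++ [-(vals.getLastD 0)]    -- vals[-1] = -vals[-1]
     else vals) ++ pvSegsB (s2 :: rest)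

def parse_dnf_alt (dnf_str : String) : List (List Int) :=
  -- compact = "".join(c for c in dnf_str if not c.isspace())
  let compact := dnf_str.toList.filter (fun c => !PySem.Chars.isspace c)
  (PySem.Chars.splitOn compact ['v']).map
    (fun conj => pvSegsB (PySem.Chars.splitOn conj ['\'']))

-- ===== PRECONDITION & SPEC =====
def Spec_parse_dnf (dnf_str : String) (out : List (List Int)) : Prop := out = parse_dnf_alt dnf_str
instance (dnf_str : String) (out : List (List Int)) : Decidable (Spec_parse_dnf dnf_str out) := by unfold Spec_parse_dnf; infer_instance

-- ===== CLAIM (what is proved, stated in full; the proofs are below) =====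
def Claim_equal_parse_dnf : Prop := ∀ (dnf_str : String), Dom_parse_dnf dnf_str → Spec_parse_dnf dnf_str (parse_dnf dnf_str)

-- ===== LEMMAS AND PROOFS =====

-- "".join(s.split()) = the non-whitespace characters of s
theorem pv_join_nil_flatten (l : List (List Char)) : PySem.Chars.join [] l = l.flatten := by
  simp [PySem.Chars.join, List.intercalate]
  induction l with
  | nil => rfl
  | cons h t ih => cases t <;> simp_all [List.intersperse]

theorem pv_split0_go_flatten (s cur : List Char) (accs : List (List Char)) :
    (PySem.Chars.split₀.go s cur accs).flatten =
      accs.reverse.flatten ++ cur.reverse ++ s.filter (fun c => !PySem.Chars.isspace c) := by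
  induction s generalizing cur accs with
  | nil =>
    simp only [PySem.Chars.split₀.go]
    split_ifs with h
    · simp [List.isEmpty_iff.mp h]
    · simp
  | cons c rest ih =>
    simp only [PySem.Chars.split₀.go]
    by_cases hs : PySem.Chars.isspace c
    · simp only [hs, if_true]
      split_ifs with h
      · simp [ih, List.isEmpty_iff.mp h, hs]
      · simp [ih, hs]
    · simp [hs, ih]

theorem pv_join_split0 (s : List Char) :
    PySem.Chars.join [] (PySem.Chars.split₀ s) = s.filter (fun c => !PySem.Chars.isspace c) := by
  rw [pv_join_nil_flatten, PySem.Chars.split₀]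
  simpa using pv_split0_go_flatten s [] []

-- clean recursive form of split on a single character
def pvSplitChar (q : Char) : List Char → List (List Char)
  | [] => [[]]
  | c :: rest =>
    if c = q then [] :: pvSplitChar q rest
    else
      match pvSplitChar q rest with
      | h :: t => (c :: h) :: t
      | [] => [[c]]

theorem pvSplitChar_ne_nil (q : Char) (l : List Char) : pvSplitChar q l ≠ [] := by
  cases l with
  | nil => simp [pvSplitChar]
  | cons c rest =>
    simp only [pvSplitChar]
    split_ifs
    · simp
    · cases pvSplitChar q rest <;> simp

theorem pv_splitOn_go_single (q : Char) (fuel : Nat) :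
    ∀ (l cur : List Char) (acc : List (List Char)), l.length ≤ fuel →
      PySem.Chars.splitOn.go [q] fuel l cur acc =
        acc.reverse ++
          (match pvSplitChar q l with
           | h :: t => (cur.reverse ++ h) :: t
           | [] => [cur.reverse]) := by
  induction fuel with
  | zero =>
    intro l cur acc hl
    have : l = [] := List.length_eq_zero_iff.mp (Nat.le_zero.mp hl)
    subst this
    simp [PySem.Chars.splitOn.go, pvSplitChar]
  | succ fuel ih =>
    intro l cur acc hl
    cases l with
    | nil => simp [PySem.Chars.splitOn.go, pvSplitChar]
    | cons c rest =>
      simp only [PySem.Chars.splitOn.go]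
      have hrest : rest.length ≤ fuel := by simpa using hl
      by_cases hc : c = q
      · subst hc
        have hpre : [c].isPrefixOf (c :: rest) = true := by simp [List.isPrefixOf]
        simp only [hpre, if_true, List.length_cons, List.length_nil, List.drop_succ_cons,
          List.drop_zero]
        rw [ih rest [] (cur.reverse :: acc) hrest]
        cases h : pvSplitChar c rest with
        | nil => exact absurd h (pvSplitChar_ne_nil c rest)
        | cons hh tt => simp [pvSplitChar, h]
      · have hpre : [q].isPrefixOf (c :: rest) = false := by
          simp [List.isPrefixOf]
          intro h; exact absurd h.symm hc
        simp only [hpre, Bool.false_eq_true, if_false]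
        rw [ih rest (c :: cur) acc hrest]
        cases h : pvSplitChar q rest with
        | nil => exact absurd h (pvSplitChar_ne_nil q rest)
        | cons hh tt => simp [pvSplitChar, hc, h]

theorem pv_splitOn_single (q : Char) (l : List Char) :
    PySem.Chars.splitOn l [q] = pvSplitChar q l := by
  rw [PySem.Chars.splitOn, pv_splitOn_go_single q (l.length + 1) l [] [] (by omega)]
  cases h : pvSplitChar q l with
  | nil => exact absurd h (pvSplitChar_ne_nil q l)
  | cons hh tt => simp

theorem pvConjA_append (conj : List Char) :
    ∀ acc, pvConjA conj acc = acc ++ pvConjA conj [] := by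
  induction conj with
  | nil => intro acc; simp [pvConjA]
  | cons c rest ih =>
    intro acc
    by_cases ha : PySem.Chars.isalnum c = true
    · simp only [pvConjA, ha, if_true]
      split_ifs with hd
      · rw [ih (acc ++ [-((c.toNat : Int))]), ih ([] ++ [-((c.toNat : Int))])]
        simp
      · rw [ih (acc ++ [((c.toNat : Int))]), ih ([] ++ [((c.toNat : Int))])]
        simp
    · simp only [pvConjA, ha, Bool.false_eq_true, if_false]
      exact ih acc

-- the per-conjunct equivalence: A's look-ahead scan = B's segment decomposition
theorem pv_conj_eq (conj : List Char) :
    pvConjA conj [] = pvSegsB (pvSplitChar '\'' conj) := by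
  induction conj with
  | nil => simp [pvConjA, pvSplitChar, pvSegsB, pvSegVals]
  | cons c rest ih =>
    by_cases ha : PySem.Chars.isalnum c = true
    · have hc : ¬ (c = '\'') := by
        intro h; subst h; exact absurd ha (by decide)
      cases rest with
      | nil =>
        simp [pvConjA, ha, pvSplitChar, hc, pvSegsB, pvSegVals]
      | cons d rest' =>
        by_cases hd : d = '\''
        · subst hd
          -- A: negated literal; apostrophe then skipped
          have hq : PySem.Chars.isalnum '\'' = false := by decide
          have hA : pvConjA (c :: '\'' :: rest') [] = -((c.toNat : Int)) :: pvConjA rest' [] := by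
            conv_lhs => rw [pvConjA.eq_def]
            simp only [ha, if_true, BEq.rfl]
            conv_lhs => rw [pvConjA.eq_def]
            simp only [hq, Bool.false_eq_true, if_false]
            rw [pvConjA_append]
            simp
          rw [hA]
          -- B: splitChar gives [c] :: splitChar rest'
          simp only [pvSplitChar, hc, if_false, if_true]
          cases hs : pvSplitChar '\'' rest' with
          | nil => exact absurd hs (pvSplitChar_ne_nil _ _)
          | cons h' t' =>
            have ihB : pvConjA rest' [] = pvSegsB (h' :: t') := by
              have := ih
              simp only [pvSplitChar, if_true] at this
              -- ih : pvConjA ('\''::rest') [] = pvSegsB ([] :: pvSplitChar '\'' rest')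
              have hA2 : pvConjA ('\'' :: rest') [] = pvConjA rest' [] := by
                simp [pvConjA, hq]
              rw [hA2, hs] at this
              simpa [pvSegsB, pvSegVals] using this
            rw [ihB]
            simp [pvSegsB, pvSegVals, ha]
        · -- positive literal
          have hA : pvConjA (c :: d :: rest') [] = ((c.toNat : Int)) :: pvConjA (d :: rest') [] := by
            have hdb : (d == '\'') = false := by simpa using hd
            conv_lhs => rw [pvConjA.eq_def]
            simp only [ha, if_true, hdb, Bool.false_eq_true, if_false]
            rw [pvConjA_append]
            simp
          rw [hA, ih]
          simp only [pvSplitChar, hc, hd, if_false]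
          cases hs : pvSplitChar '\'' rest' with
          | nil => exact absurd hs (pvSplitChar_ne_nil _ _)
          | cons h' t' =>
            cases t' with
            | nil => simp [pvSegsB, pvSegVals, ha]
            | cons t'' ts =>
              simp only [pvSegsB, pvSegVals]
              have hlast : (c :: d :: h').getLast? = (d :: h').getLast? := by
                simp [List.getLast?_cons_cons]
              rw [hlast]
              by_cases hg : (match (d :: h').getLast? with
                  | some x => PySem.Chars.isalnum x | none => false) = true
              · -- last char of the segment is alnum ⇒ its vals list is nonempty
                obtain ⟨x, hx, hax⟩ : ∃ x, (d :: h').getLast? = some x ∧ PySem.Chars.isalnum x = true := by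
                  cases hgl : (d :: h').getLast? with
                  | none => simp [hgl] at hg
                  | some x => exact ⟨x, rfl, by simpa [hgl] using hg⟩
                have hmem : x ∈ d :: h' := List.mem_of_getLast? hx
                have hvne : ((d :: h').filter (fun c => PySem.Chars.isalnum c)).map
                    (fun c => ((c.toNat : Int))) ≠ [] := by
                  simp only [ne_eq, List.map_eq_nil_iff, List.filter_eq_nil_iff, not_forall]
                  exact ⟨x, hmem, by simp [hax]⟩
                simp only [hg, if_true, List.filter_cons_of_pos ha, List.map_cons]
                obtain ⟨y, ys, hys⟩ := List.exists_cons_of_ne_nil hvne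
                rw [hys]
                simp
              · simp [hg, ha]
    · have ha' : PySem.Chars.isalnum c = false := by simpa using ha
      have hA : pvConjA (c :: rest) [] = pvConjA rest [] := by
        simp [pvConjA, ha']
      rw [hA, ih]
      by_cases hc : c = '\''
      · subst hc
        simp only [pvSplitChar, if_true]
        cases hs : pvSplitChar '\'' rest with
        | nil => exact absurd hs (pvSplitChar_ne_nil _ _)
        | cons h' t' => simp [pvSegsB, pvSegVals]
      · simp only [pvSplitChar, hc, if_false]
        cases hs : pvSplitChar '\'' rest with
        | nil => exact absurd hs (pvSplitChar_ne_nil _ _)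
        | cons h' t' =>
          cases t' with
          | nil => simp [pvSegsB, pvSegVals, ha']
          | cons t'' ts =>
            simp only [pvSegsB, pvSegVals]
            cases h' with
            | nil => simp [ha']
            | cons e es =>
              have hlast : (c :: e :: es).getLast? = (e :: es).getLast? := by
                simp [List.getLast?_cons_cons]
              rw [hlast]
              simp [List.filter_cons, ha']

-- ===== VERDICT (by name: the statement is the Claim_ definition above) =====
theorem parse_dnf_spec : Claim_equal_parse_dnf := by
  intro s _
  unfold Spec_parse_dnf parse_dnf parse_dnf_alt
  rw [pv_join_split0]
  refine (List.map_congr_left (fun conj _ => ?_)).symm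
  rw [pv_splitOn_single]
  exact (pv_conj_eq conj).symm
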